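-- pv_equiv track=rewrite | github.com/entlabo3/mairis2025 | scripts/0420extract_exons.py | create_coordinate_map
-- ===== SOURCE A (Python) =====
-- def create_coordinate_map(ref_seq: str, query_seq: str) -> dict[int, int]:
--     """
--     Create coordinate conversion map from aligned sequences
--     Returns in 1-based coordinate system
--
--     Args:
--         ref_seq: Reference sequence (with gaps)
--         query_seq: Query sequence (with gaps)
--
--     Returns:
--         Conversion map from reference to query coordinates (1-based)
--     """
--     ref_pos = 1  # Reference sequence actual position (1-based)
--     query_pos = 1  # Query sequence actual position (1-based)
--     coord_map = {}
--
--     for ref_char, query_char in zip(ref_seq, query_seq):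
--         if ref_char != '-':
--             if query_char != '-':
--                 coord_map[ref_pos] = query_pos
--             ref_pos += 1
--
--         if query_char != '-':
--             query_pos += 1
--
--     return coord_map
-- ===== SOURCE B (Python) =====
-- def _cum(seq):
--     """Running count of non-gap characters: _cum(s)[i] is the 1-based
--     sequence position of column i (unchanged across gap columns)."""
--     out, n = [], 0
--     for ch in seq:
--         if ch != '-':
--             n += 1
--         out.append(n)
--     return out
--
--
-- def create_coordinate_map(ref_seq: str, query_seq: str) -> dict[int, int]:
--     return {r: q
--             for rc, qc, r, q in zip(ref_seq, query_seq, _cum(ref_seq), _cum(query_seq))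
--             if rc != '-' and qc != '-'}
-- ===== Notes on version B (the rewrite author's own statement) =====
-- stated objective: alternative
-- what changed: B precomputes cumulative non-gap position tables for both sequences and then builds the map in a single dict comprehension over the zipped columns, instead of threading two mutating position counters and nested ifs through one loop.
import Mathlib
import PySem

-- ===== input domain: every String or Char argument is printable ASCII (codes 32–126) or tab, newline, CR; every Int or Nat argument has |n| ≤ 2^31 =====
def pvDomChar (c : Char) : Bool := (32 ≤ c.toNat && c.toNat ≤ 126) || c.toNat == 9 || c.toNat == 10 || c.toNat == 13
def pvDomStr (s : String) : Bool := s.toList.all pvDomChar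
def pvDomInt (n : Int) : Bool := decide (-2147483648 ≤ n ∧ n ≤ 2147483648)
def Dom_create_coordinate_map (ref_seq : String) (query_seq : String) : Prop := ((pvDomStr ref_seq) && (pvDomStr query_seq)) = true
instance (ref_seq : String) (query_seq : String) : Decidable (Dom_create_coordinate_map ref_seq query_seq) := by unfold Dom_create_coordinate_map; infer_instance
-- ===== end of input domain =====

-- B builds both cumulative position tables first and fills the map in one
-- selection pass over the zipped columns (alternative decomposition, same cost).


-- ===== PORT A =====
-- loop body of A: update coord_map, then ref_pos, then query_pos
def pvStepA (st : Int × Int × PySem.Dict Int Int) (p : Char × Char) :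
    Int × Int × PySem.Dict Int Int :=
  let ref_pos := st.1
  let query_pos := st.2.1
  let coord_map := st.2.2
  let coord_map := if p.1 ≠ '-' then
      (if p.2 ≠ '-' then coord_map.insert ref_pos query_pos else coord_map)
    else coord_map
  let ref_pos := if p.1 ≠ '-' then ref_pos + 1 else ref_pos
  let query_pos := if p.2 ≠ '-' then query_pos + 1 else query_pos
  (ref_pos, query_pos, coord_map)

def create_coordinate_map (ref_seq : String) (query_seq : String) : List (Int × Int) :=
  ((ref_seq.toList.zip query_seq.toList).foldl pvStepA
    (1, 1, PySem.Dict.empty)).2.2.items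

-- ===== PORT B =====
-- _cum from Source B: running count of non-gap characters
def pvCum (s : List Char) : List Int :=
  (s.foldl (fun st ch =>
      let n := if ch ≠ '-' then st.1 + 1 else st.1
      (n, st.2 ++ [n]))
    ((0 : Int), ([] : List Int))).2

def create_coordinate_map_alt (ref_seq : String) (query_seq : String) : List (Int × Int) :=
  let lr := ref_seq.toList
  let lq := query_seq.toList
  (((lr.zip lq).zip ((pvCum lr).zip (pvCum lq))).foldl
      (fun d p => if p.1.1 ≠ '-' ∧ p.1.2 ≠ '-' then d.insert p.2.1 p.2.2 else d)
      PySem.Dict.empty).items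

-- ===== PRECONDITION & SPEC =====
def Spec_create_coordinate_map (ref_seq : String) (query_seq : String) (out : List (Int × Int)) : Prop := out = create_coordinate_map_alt ref_seq query_seq
instance (ref_seq : String) (query_seq : String) (out : List (Int × Int)) : Decidable (Spec_create_coordinate_map ref_seq query_seq out) := by unfold Spec_create_coordinate_map; infer_instance

-- ===== CLAIM (what is proved, stated in full; the proofs are below) =====
def Claim_equal_create_coordinate_map : Prop := ∀ (ref_seq : String) (query_seq : String), Dom_create_coordinate_map ref_seq query_seq → Spec_create_coordinate_map ref_seq query_seq (create_coordinate_map ref_seq query_seq)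

-- ===== LEMMAS AND PROOFS =====

-- functional form of B's cumulative table starting at count n
def pvCumF (n : Int) : List Char → List Int
  | [] => []
  | c :: t => let n' := if c ≠ '-' then n + 1 else n; n' :: pvCumF n' t

lemma pvCum_acc (s : List Char) : ∀ (n : Int) (acc : List Int),
    (s.foldl (fun st ch =>
        let m := if ch ≠ '-' then st.1 + 1 else st.1
        (m, st.2 ++ [m])) (n, acc)).2 = acc ++ pvCumF n s := by
  induction s with
  | nil => intro n acc; simp [pvCumF]
  | cons c t ih =>
    intro n acc
    rw [List.foldl_cons,
      show (let m := if c ≠ '-' then ((n, acc) : Int × List Int).1 + 1 else (n, acc).1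
            ((m : Int), (n, acc).2 ++ [m]))
        = ((if c ≠ '-' then n + 1 else n), acc ++ [if c ≠ '-' then n + 1 else n]) from rfl,
      ih]
    by_cases h : c = '-' <;> simp [pvCumF, h]

lemma pvMain (lr : List Char) : ∀ (lq : List Char) (nr nq : Int) (d : PySem.Dict Int Int),
    ((lr.zip lq).foldl pvStepA (nr + 1, nq + 1, d)).2.2
      = ((lr.zip lq).zip ((pvCumF nr lr).zip (pvCumF nq lq))).foldl
          (fun d p => if p.1.1 ≠ '-' ∧ p.1.2 ≠ '-' then d.insert p.2.1 p.2.2 else d) d := by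
  induction lr with
  | nil => intro lq nr nq d; simp
  | cons c t ih =>
    intro lq nr nq d
    cases lq with
    | nil => simp
    | cons q tq =>
      by_cases hc : c = '-' <;> by_cases hq : q = '-' <;>
        simp only [List.zip_cons_cons, pvCumF, List.foldl_cons, pvStepA, hc, hq,
          ne_eq, not_true_eq_false, not_false_eq_true, if_true, if_false] <;>
        first
          | simpa using ih tq nr nq d
          | simpa using ih tq (nr + 1) nq d
          | simpa using ih tq nr (nq + 1) d
          | simpa using ih tq (nr + 1) (nq + 1) (d.insert (nr + 1) (nq + 1))

-- ===== VERDICT (by name: the statement is the Claim_ definition above) =====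
theorem create_coordinate_map_spec : Claim_equal_create_coordinate_map := by
  intro r q _
  unfold Spec_create_coordinate_map create_coordinate_map create_coordinate_map_alt
  have h1 : pvCum r.toList = pvCumF 0 r.toList := by
    simpa [pvCum] using pvCum_acc r.toList 0 []
  have h2 : pvCum q.toList = pvCumF 0 q.toList := by
    simpa [pvCum] using pvCum_acc q.toList 0 []
  simp only [h1, h2]
  exact congrArg PySem.Dict.items
    (by simpa using pvMain r.toList q.toList 0 0 PySem.Dict.empty)
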